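-- pv_equiv track=rewrite | github.com/Cavanshirpro/Vultrion | core/terminalWorker.py | _locate_token
-- ===== SOURCE A (Python) =====
-- def _locate_token(text: str) -> tuple[int, list[str]]:
--     tokens_before: list[str] = []
--     token_start = 0
--     segment_start = 0
--     quote_char: Optional[str] = None
--
--     for index, char in enumerate(text):
--         if char in {"'", '"'}:
--             if quote_char is None:
--                 quote_char = char
--             elif quote_char == char:
--                 quote_char = None
--             continue
--
--         if char.isspace() and quote_char is None:
--             token = text[segment_start:index]
--             if token:
--                 tokens_before.append(token)
--             segment_start = index + 1
--             token_start = segment_start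
--
--     token_start = segment_start
--     return token_start, tokens_before
-- ===== SOURCE B (Python) =====
-- def _locate_token(text: str) -> tuple[int, list[str]]:
--     # Pass 1: record positions of unquoted whitespace (token boundaries).
--     boundaries = []
--     quote_char = None
--     for index, char in enumerate(text):
--         if char in ("'", '"'):
--             if quote_char is None:
--                 quote_char = char
--             elif quote_char == char:
--                 quote_char = None
--         elif char.isspace() and quote_char is None:
--             boundaries.append(index)
--     # Pass 2: slice tokens out between consecutive boundaries.
--     tokens = []
--     prev = 0
--     for b in boundaries:
--         piece = text[prev:b]
--         if piece:
--             tokens.append(piece)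
--         prev = b + 1
--     token_start = boundaries[-1] + 1 if boundaries else 0
--     return token_start, tokens
-- ===== Notes on version B (the rewrite author's own statement) =====
-- stated objective: alternative
-- what changed: B splits A's single token-building scan into two passes: the character loop only records boundary indices of unquoted whitespace, and a second pass slices the tokens out between consecutive boundaries and derives the final token start from the last boundary.
import Mathlib
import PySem

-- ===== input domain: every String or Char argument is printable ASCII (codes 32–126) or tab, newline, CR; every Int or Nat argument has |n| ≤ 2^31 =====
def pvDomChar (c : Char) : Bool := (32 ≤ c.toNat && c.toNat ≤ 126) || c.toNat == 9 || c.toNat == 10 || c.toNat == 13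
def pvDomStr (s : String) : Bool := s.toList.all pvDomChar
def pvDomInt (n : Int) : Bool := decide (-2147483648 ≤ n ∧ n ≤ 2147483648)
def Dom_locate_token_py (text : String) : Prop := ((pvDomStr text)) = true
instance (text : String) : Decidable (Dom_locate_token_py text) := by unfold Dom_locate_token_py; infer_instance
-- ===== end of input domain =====

-- B replaces A's token-building single pass by two passes (record unquoted-whitespace
-- boundary indices, then slice tokens between consecutive boundaries); objective: alternative.

-- ===== PORT A =====
-- one iteration of A's for-loop: state (tokens_before, token_start, segment_start, quote_char)
def pvAStep (cs : List Char) : (List String × Int × Int × Option Char) → (Int × Char) → (List String × Int × Int × Option Char)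
  | (tokens, tstart, seg, q), (i, c) =>
    if c == '\'' || c == '"' then
      match q with
      | none => (tokens, tstart, seg, some c)
      | some qc => if qc == c then (tokens, tstart, seg, none) else (tokens, tstart, seg, some qc)
    else if PySem.Chars.isspace c && q.isNone then
      let token := PySem.List.slice cs (some seg) (some i)
      ((if token ≠ [] then tokens ++ [String.ofList token] else tokens), i + 1, i + 1, q)
    else (tokens, tstart, seg, q)

def locate_token_py (text : String) : Int × List String :=
  let cs := text.toList
  let st := (PySem.List.enumerate cs 0).foldl (pvAStep cs) ([], 0, 0, none)
  -- token_start = segment_start after the loop; return token_start, tokens_before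
  (st.2.2.1, st.1)

-- ===== PORT B =====
-- pass 1 step: collect indices of unquoted whitespace, tracking the quote toggle
def pvBStep : (List Int × Option Char) → (Int × Char) → (List Int × Option Char)
  | (bs, q), (i, c) =>
    if c == '\'' || c == '"' then
      match q with
      | none => (bs, some c)
      | some qc => if qc == c then (bs, none) else (bs, some qc)
    else if PySem.Chars.isspace c && q.isNone then (bs ++ [i], q)
    else (bs, q)

-- pass 2 step: slice text[prev:b], keep if non-empty, advance prev to b+1
def pvCut (cs : List Char) (st : List String × Int) (b : Int) : List String × Int :=
  let piece := PySem.List.slice cs (some st.2) (some b)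
  ((if piece ≠ [] then st.1 ++ [String.ofList piece] else st.1), b + 1)

-- last boundary + 1, or 0 with no boundary
def pvSeg (bs : List Int) : Int :=
  match bs.getLast? with
  | some b => b + 1
  | none => 0

def locate_token_py_alt (text : String) : Int × List String :=
  let cs := text.toList
  let bs := ((PySem.List.enumerate cs 0).foldl pvBStep ([], none)).1
  let tokens := (bs.foldl (pvCut cs) ([], 0)).1
  (pvSeg bs, tokens)

-- ===== PRECONDITION & SPEC =====
def Spec_locate_token_py (text : String) (out : Int × List String) : Prop := out = locate_token_py_alt text
instance (text : String) (out : Int × List String) : Decidable (Spec_locate_token_py text out) := by unfold Spec_locate_token_py; infer_instance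

-- ===== CLAIM (what is proved, stated in full; the proofs are below) =====
def Claim_equal_locate_token_py : Prop := ∀ (text : String), Dom_locate_token_py text → Spec_locate_token_py text (locate_token_py text)

-- ===== LEMMAS AND PROOFS =====

-- the running 'prev' of pass 2 is the last processed boundary + 1
theorem pvCut_snd (cs : List Char) (bs : List Int) :
    (bs.foldl (pvCut cs) ([], 0)).2 = pvSeg bs := by
  induction bs using List.reverseRecOn with
  | nil => rfl
  | append_singleton bs b ih =>
    simp [List.foldl_append, pvCut, pvSeg]

-- appending a boundary performs exactly A's whitespace step on the token list
theorem pvCut_append (cs : List Char) (bs : List Int) (b : Int) :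
    ((bs ++ [b]).foldl (pvCut cs) ([], 0)).1 =
      (if PySem.List.slice cs (some (pvSeg bs)) (some b) ≠ [] then
        (bs.foldl (pvCut cs) ([], 0)).1 ++ [String.ofList (PySem.List.slice cs (some (pvSeg bs)) (some b))]
       else (bs.foldl (pvCut cs) ([], 0)).1) := by
  simp only [List.foldl_append, List.foldl_cons, List.foldl_nil]
  simp [pvCut, pvCut_snd]

-- loop invariant: A's fold state corresponds to B's boundary list via pvCut/pvSeg
theorem pvMain (cs : List Char) (l : List Char) :
    ∀ (i ts : Int) (bs : List Int) (q : Option Char),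
    ((PySem.List.enumerate l i).foldl (pvAStep cs) ((bs.foldl (pvCut cs) ([], 0)).1, ts, pvSeg bs, q)).1
      = ((((PySem.List.enumerate l i).foldl pvBStep (bs, q)).1).foldl (pvCut cs) ([], 0)).1
    ∧ ((PySem.List.enumerate l i).foldl (pvAStep cs) ((bs.foldl (pvCut cs) ([], 0)).1, ts, pvSeg bs, q)).2.2.1
      = pvSeg (((PySem.List.enumerate l i).foldl pvBStep (bs, q)).1) := by
  induction l with
  | nil => intro i ts bs q; simp [PySem.List.enumerate_nil]
  | cons c l ih =>
    intro i ts bs q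
    rw [PySem.List.enumerate_cons]
    simp only [List.foldl_cons]
    by_cases hq : (c == '\'' || c == '"') = true
    · cases q with
      | none =>
        simp only [pvAStep, pvBStep, hq, if_true]
        exact ih (i + 1) ts bs (some c)
      | some qc =>
        by_cases hqc : (qc == c) = true
        · simp only [pvAStep, pvBStep, hq, hqc, if_true]
          exact ih (i + 1) ts bs none
        · simp only [pvAStep, pvBStep, hq, hqc, if_true, Bool.false_eq_true, if_false]
          exact ih (i + 1) ts bs (some qc)
    · by_cases hs : (PySem.Chars.isspace c && q.isNone) = true
      · have hqn : q = none := by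
          cases q with
          | none => rfl
          | some qc => simp at hs
        subst hqn
        simp only [pvAStep, pvBStep, hq, hs, if_true, Bool.false_eq_true, if_false]
        have h2 : pvSeg (bs ++ [i]) = i + 1 := by
          simp [pvSeg]
        have key := ih (i + 1) (i + 1) (bs ++ [i]) none
        rw [pvCut_append cs bs i, h2] at key
        exact key
      · simp only [pvAStep, pvBStep, hq, hs, Bool.false_eq_true, if_false]
        exact ih (i + 1) ts bs q

-- ===== VERDICT (by name: the statement is the Claim_ definition above) =====
theorem locate_token_py_spec : Claim_equal_locate_token_py := by
  intro text _
  unfold Spec_locate_token_py locate_token_py locate_token_py_alt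
  have h := pvMain text.toList text.toList 0 0 [] none
  simp only [List.foldl_nil] at h
  have hseg : pvSeg ([] : List Int) = 0 := rfl
  rw [← hseg] at h ⊢
  exact Prod.ext h.2 h.1
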